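-- pv_equiv track=rewrite | github.com/devdo-eu/stego_python | stego.py | encryptFlat
-- ===== SOURCE A (Python) =====
-- def setBit(var, offset):
--     mask = 1 << offset
--     return(var | mask)
--
-- def clearBit(var, offset):
--     mask = ~(1 << offset)
--     return(var & mask)
--
-- def testBit(var, offset):
--     mask = 1 << offset
--     return(var & mask)
--
-- def encryptFlat(channels, information):
--     bits = 0
--     chars = 0
--     for idx, byte in enumerate(channels):
--         if testBit(information[chars], bits):
--             channels[idx] = setBit(channels[idx], 0)
--         else:
--             channels[idx] = clearBit(channels[idx], 0)
--
--         bits = (bits + 1) % 8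
--         if bits == 0:
--             chars += 1
--
--         if chars >= len(information):
--             break
--     return bits, chars
-- ===== SOURCE B (Python) =====
-- # B: staged two-pass design. Stage 1 materializes the whole bit stream of
-- # `information` as a flat list; stage 2 zip-writes its prefix onto the channel
-- # LSBs; the return is arithmetic on the number of bits actually written.
-- # Like A, mutates `channels` in place; equivalence claimed is on the return value.
-- def encryptFlat(channels, information):
--     stream = [(byte >> k) & 1 for byte in information for k in range(8)]
--     written = min(len(channels), len(stream))
--     for i, bit in enumerate(stream[:written]):
--         channels[i] = (channels[i] & ~1) | bit
--     return written % 8, written // 8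
-- ===== Notes on version B (the rewrite author's own statement) =====
-- stated objective: alternative
-- what changed: A streams over channels with running bits/chars counters, per-bit testBit/setBit/clearBit branches and an in-loop break; B is a staged two-pass design: it first materializes the whole bit stream of `information` as a flat list, then zip-writes its prefix onto the channel LSBs, and returns divmod-style arithmetic on the number of bits written.
import Mathlib
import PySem

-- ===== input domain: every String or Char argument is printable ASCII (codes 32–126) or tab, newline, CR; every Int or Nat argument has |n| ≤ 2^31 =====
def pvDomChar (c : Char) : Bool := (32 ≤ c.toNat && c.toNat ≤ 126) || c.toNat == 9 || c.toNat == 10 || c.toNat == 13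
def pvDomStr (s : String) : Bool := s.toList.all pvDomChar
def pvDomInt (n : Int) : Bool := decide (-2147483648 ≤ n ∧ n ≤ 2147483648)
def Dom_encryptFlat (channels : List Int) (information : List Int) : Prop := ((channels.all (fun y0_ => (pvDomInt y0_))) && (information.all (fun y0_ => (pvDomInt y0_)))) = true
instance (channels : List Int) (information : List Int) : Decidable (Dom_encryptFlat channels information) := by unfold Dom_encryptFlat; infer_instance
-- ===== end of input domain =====

-- B replaces A's single streaming pass (running bits/chars counters, in-loop break)
-- by a staged two-pass design: materialize the flat bit stream of `information`,
-- zip-write its prefix onto the channel LSBs, return arithmetic on the count written.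
-- Both Pythons mutate `channels`' LSBs in place identically — the equivalence proved
-- here is about the RETURN value only.

-- ===== PORT A =====
-- A's loop over `channels`: the write channels[idx] = set/clearBit(...) mutates the
-- argument and does not affect the returned (bits, chars), so the state carried here
-- is (bits, chars); the information[chars] read is kept (none = IndexError, outside Pre_).
def encryptFlatGo (chs : List Int) (info : List Int) (bits chars : Int) : Int × Int :=
  match chs with
  | [] => (bits, chars)
  | _ :: rest =>
    match PySem.List.pyGet? info chars with
    | none => (bits, chars)  -- information[chars] raises IndexError; excluded by Pre_
    | some _ =>
      let bits' := PySem.Int.mod (bits + 1) 8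
      let chars' := if bits' = 0 then chars + 1 else chars
      if (info.length : Int) ≤ chars' then (bits', chars')
      else encryptFlatGo rest info bits' chars'

def encryptFlat (channels : List Int) (information : List Int) : Int × Int :=
  encryptFlatGo channels information 0 0

-- ===== PORT B =====
-- Source B stage 1: stream = [(byte >> k) & 1 for byte in information for k in range(8)];
-- stage 2 (the enumerate write loop) only mutates the `channels` argument and does not
-- touch the return value; the return is (written % 8, written // 8).
def encryptFlat_alt (channels : List Int) (information : List Int) : Int × Int :=
  let stream : List Int := information.flatMap (fun byte =>
    (PySem.List.pyRange 0 8 1).map (fun k => PySem.Int.band (byte >>> k.toNat) 1))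
  let written : Int := min (channels.length : Int) (stream.length : Int)
  (PySem.Int.mod written 8, PySem.Int.floordiv written 8)

-- ===== PRECONDITION & SPEC =====
-- Pre_ excludes exactly the inputs where A raises IndexError (non-empty channels with
-- empty information, where A reads information[0]); B returns (0, 0) there.
def Pre_encryptFlat (channels : List Int) (information : List Int) : Prop :=
  channels = [] ∨ information ≠ []
instance (channels : List Int) (information : List Int) : Decidable (Pre_encryptFlat channels information) := by unfold Pre_encryptFlat; infer_instance
def pvWitness_encryptFlat : List Int × List Int := ([10, 11, 12], [65])

def Spec_encryptFlat (channels : List Int) (information : List Int) (out : Int × Int) : Prop := out = encryptFlat_alt channels information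
instance (channels : List Int) (information : List Int) (out : Int × Int) : Decidable (Spec_encryptFlat channels information out) := by unfold Spec_encryptFlat; infer_instance

-- ===== CLAIM (what is proved, stated in full; the proofs are below) =====
def Claim_equal_encryptFlat : Prop := ∀ (channels : List Int) (information : List Int), Dom_encryptFlat channels information → Pre_encryptFlat channels information → Spec_encryptFlat channels information (encryptFlat channels information)

-- ===== LEMMAS AND PROOFS =====

-- Loop invariant: after k channel slots have been processed (k < 8*len(info)),
-- A's state is (k % 8, k / 8) and the remaining loop returns the divmod of
-- the final count min (k + |rest|) (8*len(info)).
lemma encryptFlatGo_eq (rest info : List Int) (k : Nat) (hk : k < 8 * info.length) :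
    encryptFlatGo rest info ((k % 8 : Nat) : Int) ((k / 8 : Nat) : Int)
      = (((min (k + rest.length) (8 * info.length) % 8 : Nat) : Int),
         ((min (k + rest.length) (8 * info.length) / 8 : Nat) : Int)) := by
  induction rest generalizing k with
  | nil =>
    simp only [encryptFlatGo, List.length_nil, Nat.add_zero]
    have : min k (8 * info.length) = k := by omega
    rw [this]
  | cons c rest ih =>
    have hlt : k / 8 < info.length := by omega
    have hget : PySem.List.pyGet? info ((k / 8 : Nat) : Int) = some info[k / 8] := by
      rw [PySem.List.pyGet?_natCast]
      exact List.getElem?_eq_getElem hlt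
    simp only [encryptFlatGo, hget]
    have hmod : PySem.Int.mod (((k % 8 : Nat) : Int) + 1) 8 = (((k + 1) % 8 : Nat) : Int) := by
      have h8 : (0:Int) < 8 := by omega
      rw [PySem.Int.mod_eq_emod_of_pos h8]
      omega
    rw [hmod]
    have hchars : (if (((k + 1) % 8 : Nat) : Int) = 0 then ((k / 8 : Nat) : Int) + 1
        else ((k / 8 : Nat) : Int)) = (((k + 1) / 8 : Nat) : Int) := by
      split_ifs with h
      · omega
      · omega
    rw [hchars]
    by_cases hbrk : (info.length : Int) ≤ (((k + 1) / 8 : Nat) : Int)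
    · rw [if_pos hbrk]
      have : min (k + (c :: rest).length) (8 * info.length) = k + 1 := by
        simp only [List.length_cons]; omega
      rw [this]
    · rw [if_neg hbrk]
      have hk1 : k + 1 < 8 * info.length := by omega
      have := ih (k + 1) hk1
      rw [this]
      simp only [List.length_cons]
      ring_nf

-- Source B's bit stream has exactly 8 bits per information byte.
lemma stream_length (info : List Int) :
    (info.flatMap (fun byte =>
      (PySem.List.pyRange 0 8 1).map (fun k => PySem.Int.band (byte >>> k.toNat) 1))).length
      = 8 * info.length := by
  induction info with
  | nil => rfl
  | cons b info ih =>
    rw [List.flatMap_cons, List.length_append, ih, List.length_map, List.length_cons]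
    have h : (PySem.List.pyRange 0 8 1).length = 8 := by decide
    rw [h]
    ring

lemma encryptFlat_alt_eval (channels info : List Int) :
    encryptFlat_alt channels info
      = (((min channels.length (8 * info.length) % 8 : Nat) : Int),
         ((min channels.length (8 * info.length) / 8 : Nat) : Int)) := by
  have key : ∀ w : Int,
      w = min (channels.length : Int)
        (((info.flatMap (fun byte => (PySem.List.pyRange 0 8 1).map
          (fun k => PySem.Int.band (byte >>> k.toNat) 1))).length : Int)) →
      (PySem.Int.mod w 8, PySem.Int.floordiv w 8)
        = (((min channels.length (8 * info.length) % 8 : Nat) : Int),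
           ((min channels.length (8 * info.length) / 8 : Nat) : Int)) := by
    intro w hw
    rw [hw, stream_length]
    have h8 : (0:Int) < 8 := by omega
    rw [PySem.Int.mod_eq_emod_of_pos h8, PySem.Int.floordiv_eq_ediv_of_pos h8]
    refine Prod.ext ?_ ?_ <;> simp
  exact key _ rfl

-- ===== VERDICT (by name: the statement is the Claim_ definition above) =====
theorem encryptFlat_spec : Claim_equal_encryptFlat := by
  intro channels information _ hpre
  unfold Spec_encryptFlat
  rw [encryptFlat_alt_eval]
  cases channels with
  | nil => simp [encryptFlat, encryptFlatGo]
  | cons c rest =>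
    have hinfo : information ≠ [] := by
      rcases hpre with h | h
      · exact absurd h (by simp)
      · exact h
    have hlen : information.length ≠ 0 := fun h => hinfo (List.eq_nil_of_length_eq_zero h)
    have hpos : 0 < 8 * information.length := by omega
    have := encryptFlatGo_eq (c :: rest) information 0 hpos
    simpa [encryptFlat] using this
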